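-- pv_equiv track=rewrite | github.com/aacrit/void--news | pipeline/clustering/story_cluster.py | _generate_cluster_summary
-- ===== SOURCE A (Python) =====
-- def _generate_cluster_summary(articles: list[dict]) -> str:
--     """
--     Generate a cluster summary by selecting the most informative article
--     summary from the cluster.
--
--     For multi-article clusters, picks the longest substantive summary
--     (avoiding very short or boilerplate text). Falls back to constructing
--     a brief description from the cluster title and source count.
--     """
--     summaries = []
--     for a in articles:
--         summary = (a.get("summary", "") or "").strip()
--         if summary and len(summary) >= 40:
--             summaries.append(summary)
--
--     if not summaries:
--         # Fall back to shorter summaries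
--         for a in articles:
--             summary = (a.get("summary", "") or "").strip()
--             if summary and len(summary) >= 15:
--                 summaries.append(summary)
--
--     if summaries:
--         # Pick the longest non-duplicate summary (most informative)
--         summaries.sort(key=len, reverse=True)
--         return summaries[0]
--
--     # Last resort: use the first article's title
--     for a in articles:
--         title = (a.get("title", "") or "").strip()
--         if title:
--             return title
--
--     return ""
-- ===== SOURCE B (Python) =====
-- def _generate_cluster_summary(articles: list[dict]) -> str:
--     best_strong = None   # longest summary with len >= 40 (earliest wins ties)
--     best_weak = None     # longest summary with len >= 15 (earliest wins ties)
--     first_title = None   # first non-empty stripped title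
--     for a in articles:
--         s = (a.get("summary", "") or "").strip()
--         n = len(s)
--         if n >= 40 and (best_strong is None or n > len(best_strong)):
--             best_strong = s
--         if n >= 15 and (best_weak is None or n > len(best_weak)):
--             best_weak = s
--         if first_title is None:
--             t = (a.get("title", "") or "").strip()
--             if t:
--                 first_title = t
--     if best_strong is not None:
--         return best_strong
--     if best_weak is not None:
--         return best_weak
--     if first_title is not None:
--         return first_title
--     return ""
-- ===== Notes on version B (the rewrite author's own statement) =====
-- stated objective: alternative
-- what changed: Replaces the two filter passes plus a full stable reverse sort by length with a single pass over articles that strips each summary once and keeps three running accumulators (best >=40 summary, best >=15 summary, first non-empty title), using strict > so the earliest longest summary wins exactly as the stable sort's head does.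
import Mathlib
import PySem

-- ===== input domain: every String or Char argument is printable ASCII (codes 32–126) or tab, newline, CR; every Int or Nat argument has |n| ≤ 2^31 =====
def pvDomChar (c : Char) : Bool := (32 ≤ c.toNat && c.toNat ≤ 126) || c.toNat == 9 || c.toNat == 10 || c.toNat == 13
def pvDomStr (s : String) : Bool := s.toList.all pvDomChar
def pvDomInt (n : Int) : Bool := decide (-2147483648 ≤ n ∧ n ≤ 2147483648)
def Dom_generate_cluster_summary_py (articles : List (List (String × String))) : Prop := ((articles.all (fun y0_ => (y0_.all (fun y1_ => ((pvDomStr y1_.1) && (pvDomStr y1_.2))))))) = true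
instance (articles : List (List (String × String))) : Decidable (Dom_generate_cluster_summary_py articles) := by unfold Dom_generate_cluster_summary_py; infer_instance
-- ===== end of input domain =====

-- B replaces A's two filter passes plus a stable length sort by one pass keeping three running
-- accumulators (best ≥40 summary, best ≥15 summary, first non-empty title); same return value.

-- (a.get("summary", "") or "").strip(): values are strings, so `or ""` is the identity
def pvSummaryOf (a : List (String × String)) : String :=
  PySem.Str.strip (PySem.Dict.getD ⟨a⟩ "summary" "")

-- (a.get("title", "") or "").strip()
def pvTitleOf (a : List (String × String)) : String :=
  PySem.Str.strip (PySem.Dict.getD ⟨a⟩ "title" "")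

-- ===== PORT A =====
-- A's last-resort loop over articles returning the first non-empty stripped title, else ""
def pvTitleLoop : List (List (String × String)) → String
  | [] => ""
  | a :: rest =>
    let title := pvTitleOf a
    if title ≠ "" then title else pvTitleLoop rest

def generate_cluster_summary_py (articles : List (List (String × String))) : String :=
  let summaries : List String := articles.foldl (fun acc a =>
      let summary := pvSummaryOf a
      if summary ≠ "" ∧ 40 ≤ PySem.Str.len summary then acc ++ [summary] else acc) []
  let summaries : List String :=
    if summaries.isEmpty then
      articles.foldl (fun acc a =>
        let summary := pvSummaryOf a
        if summary ≠ "" ∧ 15 ≤ PySem.Str.len summary then acc ++ [summary] else acc) []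
    else summaries
  if ¬ summaries.isEmpty then
    -- summaries.sort(key=len, reverse=True); return summaries[0]
    PySem.List.pyGetD (PySem.List.sorted summaries (fun s => PySem.Str.len s) true) 0 ""
  else
    pvTitleLoop articles

-- ===== PORT B =====
-- best is None or n > len(best)
def pvBeats (b : Option String) (n : Int) : Bool :=
  match b with
  | none => true
  | some m => decide (PySem.Str.len m < n)

def pvAltStep (st : Option String × Option String × Option String)
    (a : List (String × String)) : Option String × Option String × Option String :=
  let s := pvSummaryOf a
  let n := PySem.Str.len s
  let bs := if 40 ≤ n ∧ pvBeats st.1 n = true then some s else st.1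
  let bw := if 15 ≤ n ∧ pvBeats st.2.1 n = true then some s else st.2.1
  let ft := match st.2.2 with
    | none =>
      let t := pvTitleOf a
      if t ≠ "" then some t else none
    | some v => some v
  (bs, bw, ft)

def generate_cluster_summary_py_alt (articles : List (List (String × String))) : String :=
  let st := articles.foldl pvAltStep (none, none, none)
  match st.1 with
  | some s => s
  | none =>
    match st.2.1 with
    | some s => s
    | none =>
      match st.2.2 with
      | some t => t
      | none => ""

-- ===== PRECONDITION & SPEC =====
def Spec_generate_cluster_summary_py (articles : List (List (String × String))) (out : String) : Prop := out = generate_cluster_summary_py_alt articles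
instance (articles : List (List (String × String))) (out : String) : Decidable (Spec_generate_cluster_summary_py articles out) := by unfold Spec_generate_cluster_summary_py; infer_instance

-- ===== CLAIM (what is proved, stated in full; the proofs are below) =====
def Claim_equal_generate_cluster_summary_py : Prop := ∀ (articles : List (List (String × String))), Dom_generate_cluster_summary_py articles → Spec_generate_cluster_summary_py articles (generate_cluster_summary_py articles)

-- ===== LEMMAS AND PROOFS =====

-- "first longest" accumulator step, shared spec of both sides
def pvUpd (b : Option String) (s : String) : Option String :=
  match b with
  | none => some s
  | some m => if PySem.Str.len m < PySem.Str.len s then some s else some m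

def pvFM (l : List String) : Option String := l.foldl pvUpd none

def pvFTStep (b : Option String) (a : List (String × String)) : Option String :=
  match b with
  | none =>
    let t := pvTitleOf a
    if t ≠ "" then some t else none
  | some v => some v

-- what both ports compute: first longest ≥40 summary, else first longest ≥15 summary,
-- else first non-empty title, else ""
def pvSpecFn (articles : List (List (String × String))) : String :=
  match pvFM ((articles.map pvSummaryOf).filter (fun s => decide (40 ≤ PySem.Str.len s))) with
  | some s => s
  | none =>
    match pvFM ((articles.map pvSummaryOf).filter (fun s => decide (15 ≤ PySem.Str.len s))) with
    | some s => s
    | none => (articles.foldl pvFTStep none).getD ""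

-- head of an insertBy insertion, in Option form
theorem pv_head_insertBy (bef : String → String → Bool) (x : String) (ys : List String) :
    (PySem.List.insertBy bef x ys).head? =
      (match ys.head? with
       | none => some x
       | some y => if bef x y then some x else some y) := by
  cases ys with
  | nil => rfl
  | cons y t =>
    show (if bef x y = true then x :: y :: t else y :: PySem.List.insertBy bef x t).head? =
         (if bef x y = true then some x else some y)
    by_cases h : bef x y = true
    · simp only [if_pos h]; rfl
    · simp only [if_neg h]; rfl

theorem pv_head_foldl_insertBy (bef : String → String → Bool)
    (l : List String) (acc : List String) :
    (l.foldl (fun acc x => PySem.List.insertBy bef x acc) acc).head? =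
      l.foldl (fun b x =>
        match b with
        | none => some x
        | some y => if bef x y then some x else some y) acc.head? := by
  induction l generalizing acc with
  | nil => rfl
  | cons x t ih =>
    simp only [List.foldl_cons]
    rw [ih, pv_head_insertBy]

theorem pv_head_sorted (l : List String) :
    (PySem.List.sorted l (fun s => PySem.Str.len s) true).head? = pvFM l := by
  rw [PySem.List.sorted_rev_eq_foldl_insertBy, pv_head_foldl_insertBy]
  unfold pvFM
  congr 1
  funext b x
  cases b with
  | none => rfl
  | some y =>
    simp only [pvUpd]
    by_cases h : PySem.Str.len y < PySem.Str.len x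
    · rw [if_pos (decide_eq_true h), if_pos h]
    · rw [if_neg (by rw [decide_eq_false h]; exact Bool.false_ne_true), if_neg h]

theorem pv_fm_some (l : List String) (m : String) :
    l.foldl pvUpd (some m) ≠ none := by
  induction l generalizing m with
  | nil => exact fun h => nomatch h
  | cons x t ih =>
    simp only [List.foldl_cons, pvUpd]
    split <;> exact ih _

theorem pv_fm_eq_none_iff (l : List String) : pvFM l = none ↔ l = [] := by
  cases l with
  | nil => exact ⟨fun _ => rfl, fun _ => rfl⟩
  | cons x t =>
    simp only [pvFM, List.foldl_cons, pvUpd]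
    exact ⟨fun h => absurd h (pv_fm_some t x), fun h => nomatch h⟩

-- nonempty stripped strings: len ≥ c (c > 0) forces s ≠ ""
theorem pv_len_pos_ne (s : String) (c : Int) (hc : 0 < c) (h : c ≤ PySem.Str.len s) : s ≠ "" := by
  intro he; subst he
  rw [show PySem.Str.len "" = (0 : Int) from rfl] at h
  omega

-- A's append-fold builds exactly the filtered list of stripped summaries
theorem pv_A_fold_eq_filter (articles : List (List (String × String))) (c : Int) (hc : 0 < c) :
    articles.foldl (fun acc a =>
        let summary := pvSummaryOf a
        if summary ≠ "" ∧ c ≤ PySem.Str.len summary then acc ++ [summary] else acc) [] =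
      ((articles.map pvSummaryOf).filter (fun s => decide (c ≤ PySem.Str.len s))) := by
  have h : ∀ (acc : List String),
      articles.foldl (fun acc a =>
        let summary := pvSummaryOf a
        if summary ≠ "" ∧ c ≤ PySem.Str.len summary then acc ++ [summary] else acc) acc =
      acc ++ ((articles.map pvSummaryOf).filter (fun s => decide (c ≤ PySem.Str.len s))) := by
    induction articles with
    | nil =>
      intro acc
      rw [List.foldl_nil, List.map_nil, List.filter_nil, List.append_nil]
    | cons a t ih =>
      intro acc
      simp only [List.foldl_cons, List.map_cons, List.filter_cons]
      by_cases hlen : c ≤ PySem.Str.len (pvSummaryOf a)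
      · have hne : pvSummaryOf a ≠ "" := pv_len_pos_ne _ c hc hlen
        rw [if_pos ⟨hne, hlen⟩, ih, decide_eq_true hlen, if_pos rfl, List.append_assoc]
        rw [List.singleton_append]
      · rw [if_neg (fun hp => hlen hp.2), ih, decide_eq_false hlen,
            if_neg Bool.false_ne_true]
  rw [h [], List.nil_append]

-- B's one pass splits into three independent folds
def pvStepC (c : Int) (b : Option String) (a : List (String × String)) : Option String :=
  let s := pvSummaryOf a
  let n := PySem.Str.len s
  if c ≤ n ∧ pvBeats b n = true then some s else b

theorem pv_alt_split (l : List (List (String × String)))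
    (st : Option String × Option String × Option String) :
    l.foldl pvAltStep st =
      (l.foldl (pvStepC 40) st.1,
       l.foldl (pvStepC 15) st.2.1,
       l.foldl pvFTStep st.2.2) := by
  induction l generalizing st with
  | nil => rfl
  | cons a t ih =>
    simp only [List.foldl_cons]
    rw [ih]
    obtain ⟨b1, b2, b3⟩ := st
    simp only [pvAltStep, pvStepC, pvFTStep]

-- the guarded accumulator step is pvUpd on the filtered stream
theorem pv_stepC_eq (c : Int) (b : Option String) (a : List (String × String)) :
    pvStepC c b a =
      (if decide (c ≤ PySem.Str.len (pvSummaryOf a)) = true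
       then pvUpd b (pvSummaryOf a) else b) := by
  by_cases hc : c ≤ PySem.Str.len (pvSummaryOf a)
  · rw [decide_eq_true hc, if_pos rfl]
    cases b with
    | none =>
      simp only [pvStepC, pvBeats, pvUpd]
      rw [if_pos ⟨hc, trivial⟩]
    | some m =>
      simp only [pvStepC, pvBeats, pvUpd]
      by_cases hm : PySem.Str.len m < PySem.Str.len (pvSummaryOf a)
      · rw [if_pos ⟨hc, decide_eq_true hm⟩, if_pos hm]
      · rw [if_neg (fun hp => hm (of_decide_eq_true hp.2)), if_neg hm]
  · rw [decide_eq_false hc, if_neg Bool.false_ne_true]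
    simp only [pvStepC]
    rw [if_neg (fun hp => hc hp.1)]

theorem pv_foldl_stepC (c : Int) (l : List (List (String × String))) (b : Option String) :
    l.foldl (pvStepC c) b =
      ((l.map pvSummaryOf).filter (fun s => decide (c ≤ PySem.Str.len s))).foldl pvUpd b := by
  rw [List.foldl_filter, List.foldl_map]
  have hf : pvStepC c = fun (x : Option String) (y : List (String × String)) =>
      (if decide (c ≤ PySem.Str.len (pvSummaryOf y)) = true
       then pvUpd x (pvSummaryOf y) else x) :=
    funext fun b => funext fun a => pv_stepC_eq c b a
  rw [hf]

-- the title fold keeps its first hit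
theorem pv_ft_some (l : List (List (String × String))) (v : String) :
    l.foldl pvFTStep (some v) = some v := by
  induction l with
  | nil => rfl
  | cons a t ih => exact ih

theorem pv_titleLoop_eq (l : List (List (String × String))) :
    pvTitleLoop l = (l.foldl pvFTStep none).getD "" := by
  induction l with
  | nil => rfl
  | cons a t ih =>
    simp only [pvTitleLoop, List.foldl_cons]
    by_cases h : pvTitleOf a = ""
    · rw [if_neg (fun hn => hn h)]
      rw [show pvFTStep none a = none from by
        simp only [pvFTStep]; rw [if_neg (fun hn => hn h)]]
      exact ih
    · rw [if_pos h]
      rw [show pvFTStep none a = some (pvTitleOf a) from by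
        simp only [pvFTStep]; rw [if_pos h]]
      rw [pv_ft_some]
      rfl

-- first element of a list, default "" — as the head? of the list
theorem pv_pyGetD_zero_head (xs : List String) :
    PySem.List.pyGetD xs 0 "" = (xs.head?).getD "" := by
  rw [PySem.List.pyGetD_zero]
  cases xs <;> rfl

-- port A computes pvSpecFn
theorem pv_A_eq_specFn (articles : List (List (String × String))) :
    generate_cluster_summary_py articles = pvSpecFn articles := by
  simp only [generate_cluster_summary_py, pvSpecFn]
  rw [pv_A_fold_eq_filter articles 40 (by norm_num),
      pv_A_fold_eq_filter articles 15 (by norm_num)]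
  set S40 := ((articles.map pvSummaryOf).filter (fun s => decide (40 ≤ PySem.Str.len s))) with hS40
  set S15 := ((articles.map pvSummaryOf).filter (fun s => decide (15 ≤ PySem.Str.len s))) with hS15
  by_cases h40 : S40 = []
  · have hfm40 : pvFM S40 = none := (pv_fm_eq_none_iff S40).2 h40
    have e1 : S40.isEmpty = true := by rw [h40]; rfl
    rw [if_pos e1, hfm40]
    by_cases h15 : S15 = []
    · have hfm15 : pvFM S15 = none := (pv_fm_eq_none_iff S15).2 h15
      have e2 : S15.isEmpty = true := by rw [h15]; rfl
      rw [if_neg (fun hn => hn e2), hfm15]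
      exact pv_titleLoop_eq articles
    · have e2 : S15.isEmpty = false := by
        cases hs : S15 with
        | nil => exact absurd hs h15
        | cons x xs => rfl
      rw [if_pos (fun hn => Bool.false_ne_true (e2.symm.trans hn))]
      cases hfm : pvFM S15 with
      | none => exact absurd ((pv_fm_eq_none_iff S15).1 hfm) h15
      | some m =>
        rw [pv_pyGetD_zero_head, pv_head_sorted, hfm]
        rfl
  · have e1 : S40.isEmpty = false := by
      cases hs : S40 with
      | nil => exact absurd hs h40
      | cons x xs => rfl
    rw [if_neg (fun hn => Bool.false_ne_true (e1.symm.trans hn))]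
    rw [if_pos (fun hn => Bool.false_ne_true (e1.symm.trans hn))]
    cases hfm : pvFM S40 with
    | none => exact absurd ((pv_fm_eq_none_iff S40).1 hfm) h40
    | some m =>
      rw [pv_pyGetD_zero_head, pv_head_sorted, hfm]
      rfl

-- port B computes pvSpecFn
theorem pv_B_eq_specFn (articles : List (List (String × String))) :
    generate_cluster_summary_py_alt articles = pvSpecFn articles := by
  simp only [generate_cluster_summary_py_alt]
  rw [pv_alt_split]
  show (match articles.foldl (pvStepC 40) none with
        | some s => s
        | none =>
          match articles.foldl (pvStepC 15) none with
          | some s => s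
          | none =>
            match articles.foldl pvFTStep none with
            | some t => t
            | none => "") = pvSpecFn articles
  rw [pv_foldl_stepC, pv_foldl_stepC]
  simp only [pvSpecFn, pvFM]
  generalize ((articles.map pvSummaryOf).filter (fun s => decide (40 ≤ PySem.Str.len s))).foldl pvUpd none = r1
  generalize ((articles.map pvSummaryOf).filter (fun s => decide (15 ≤ PySem.Str.len s))).foldl pvUpd none = r2
  generalize articles.foldl pvFTStep none = r3
  cases r1 <;> cases r2 <;> cases r3 <;> rfl

-- ===== VERDICT (by name: the statement is the Claim_ definition above) =====
theorem generate_cluster_summary_py_spec : Claim_equal_generate_cluster_summary_py := by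
  intro articles _
  unfold Spec_generate_cluster_summary_py
  rw [pv_A_eq_specFn, pv_B_eq_specFn]
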